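-- pv_equiv track=rewrite | github.com/Panchal-Tirth/InsightAI-Agent | backend/app/agents/marketing_agent.py | _get_recent_data
-- ===== SOURCE A (Python) =====
-- def _get_recent_data(campaign_data: list, days: int = 7) -> list:
--     """Returns most recent N days per platform."""
--     by_platform: dict[str, list] = {}
--     for row in campaign_data:
--         camp = row.get("campaign", "unknown")
--         by_platform.setdefault(camp, []).append(row)
--
--     recent = []
--     for camp, rows in by_platform.items():
--         sorted_rows = sorted(rows, key=lambda x: x.get("date", ""))
--         recent.extend(sorted_rows[-days:])
--
--     return recent
-- ===== SOURCE B (Python) =====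
-- def _insort_by_date(rows: list, row: dict) -> None:
--     """Insert row into rows (kept ascending by date), after any equal dates."""
--     d = row.get("date", "")
--     i = 0
--     while i < len(rows) and rows[i].get("date", "") <= d:
--         i += 1
--     rows.insert(i, row)
--
--
-- def _get_recent_data(campaign_data: list, days: int = 7) -> list:
--     """Returns most recent N days per platform."""
--     groups: dict[str, list] = {}
--     for row in campaign_data:
--         camp = row.get("campaign", "unknown")
--         if camp not in groups:
--             groups[camp] = []
--         _insort_by_date(groups[camp], row)
--
--     recent = []
--     for camp, rows in groups.items():
--         recent.extend(rows[-days:])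
--     return recent
-- ===== Notes on version B (the rewrite author's own statement) =====
-- stated objective: alternative
-- what changed: Instead of grouping rows per campaign and then calling sorted() on every group, B keeps each campaign's row list in date order by inserting every row at its sorted position during the single grouping pass, so the final pass only slices off the last `days` entries and no sort remains.
import Mathlib
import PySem

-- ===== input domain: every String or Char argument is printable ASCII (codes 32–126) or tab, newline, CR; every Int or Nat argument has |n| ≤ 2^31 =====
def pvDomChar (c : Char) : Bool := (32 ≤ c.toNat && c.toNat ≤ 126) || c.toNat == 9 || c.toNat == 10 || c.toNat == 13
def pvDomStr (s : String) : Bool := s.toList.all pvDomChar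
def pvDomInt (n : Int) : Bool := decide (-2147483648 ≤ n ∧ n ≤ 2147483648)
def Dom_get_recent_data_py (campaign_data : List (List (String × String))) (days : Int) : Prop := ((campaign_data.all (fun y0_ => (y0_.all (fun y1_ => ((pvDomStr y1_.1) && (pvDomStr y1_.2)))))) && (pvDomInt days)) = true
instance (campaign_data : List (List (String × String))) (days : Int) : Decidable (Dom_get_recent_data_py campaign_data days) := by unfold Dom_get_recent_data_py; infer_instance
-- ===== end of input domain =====

-- B replaces the group-then-sort-each-group pass of A by a single grouping pass that keeps
-- every campaign's rows date-ordered through sorted insertion, so no sort call remains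
-- (objective: alternative; same results, not claimed faster).

-- ===== PORT A =====
def get_recent_data_py (campaign_data : List (List (String × String))) (days : Int) : List (List (String × String)) :=
  -- by_platform.setdefault(camp, []).append(row)  ≡  modify camp [] (· ++ [row])
  let by_platform : PySem.Dict String (List (List (String × String))) :=
    campaign_data.foldl
      (fun d row =>
        d.modify ((PySem.Dict.mk row).getD "campaign" "unknown") [] (fun l => l ++ [row]))
      (PySem.Dict.mk [])
  by_platform.items.foldl
    (fun recent cr =>
      recent ++ PySem.List.slice
        (PySem.List.sorted cr.2 (fun x => (PySem.Dict.mk x).getD "date" ""))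
        (some (-days)) none)
    []

-- ===== PORT B =====
-- while i < len(rows) and rows[i].get("date","") <= d: i += 1   (sequential read of rows[i])
def insortPosGo (d : String) (rest : List (List (String × String))) (i : Nat) : Nat :=
  match rest with
  | [] => i
  | y :: ys => if (PySem.Dict.mk y).getD "date" "" ≤ d then insortPosGo d ys (i + 1) else i

def insort_by_date (rows : List (List (String × String))) (row : List (String × String)) :
    List (List (String × String)) :=
  let d := (PySem.Dict.mk row).getD "date" ""
  let i := insortPosGo d rows 0
  PySem.List.insert rows (i : Int) row

def get_recent_data_py_alt (campaign_data : List (List (String × String))) (days : Int) : List (List (String × String)) :=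
  let groups : PySem.Dict String (List (List (String × String))) :=
    campaign_data.foldl
      (fun d row =>
        d.modify ((PySem.Dict.mk row).getD "campaign" "unknown") [] (fun l => insort_by_date l row))
      (PySem.Dict.mk [])
  groups.items.foldl
    (fun recent cr => recent ++ PySem.List.slice cr.2 (some (-days)) none)
    []

-- ===== PRECONDITION & SPEC =====
def Spec_get_recent_data_py (campaign_data : List (List (String × String))) (days : Int) (out : List (List (String × String))) : Prop := out = get_recent_data_py_alt campaign_data days
instance (campaign_data : List (List (String × String))) (days : Int) (out : List (List (String × String))) : Decidable (Spec_get_recent_data_py campaign_data days out) := by unfold Spec_get_recent_data_py; infer_instance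

-- ===== CLAIM (what is proved, stated in full; the proofs are below) =====
def Claim_equal_get_recent_data_py : Prop := ∀ (campaign_data : List (List (String × String))) (days : Int), Dom_get_recent_data_py campaign_data days → Spec_get_recent_data_py campaign_data days (get_recent_data_py campaign_data days)

-- ===== LEMMAS AND PROOFS =====

-- the fold that A's per-group `sorted` equals (PySem.List.sorted_eq_foldl_insertBy)
def pvSortFold (v : List (List (String × String))) : List (List (String × String)) :=
  v.foldl
    (fun acc x =>
      PySem.List.insertBy
        (fun a b =>
          decide ((PySem.Dict.mk a).getD "date" "" < (PySem.Dict.mk b).getD "date" "")) x acc)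
    []

theorem insortPosGo_shift (d : String) (ys : List (List (String × String))) :
    ∀ i : Nat, insortPosGo d ys i = insortPosGo d ys 0 + i := by
  induction ys with
  | nil => intro i; simp [insortPosGo]
  | cons y ys ih =>
      intro i
      simp only [insortPosGo]
      split
      · rw [ih (i + 1), ih 1]; omega
      · omega

theorem insortPosGo_le (d : String) (ys : List (List (String × String))) :
    insortPosGo d ys 0 ≤ ys.length := by
  induction ys with
  | nil => simp [insortPosGo]
  | cons y ys ih =>
      simp only [insortPosGo]
      split
      · rw [insortPosGo_shift]; simpa using ih
      · simp

-- B's front-scan insertion is exactly `insertBy` with the strict "newer date" test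
theorem insort_eq_insertBy (rows : List (List (String × String))) (row : List (String × String)) :
    insort_by_date rows row =
      PySem.List.insertBy
        (fun a b =>
          decide ((PySem.Dict.mk a).getD "date" "" < (PySem.Dict.mk b).getD "date" "")) row rows := by
  induction rows with
  | nil => rfl
  | cons y ys ih =>
      by_cases h : (PySem.Dict.mk y).getD "date" "" ≤ (PySem.Dict.mk row).getD "date" ""
      · have hp := insortPosGo_le ((PySem.Dict.mk row).getD "date" "") ys
        have hpos : insortPosGo ((PySem.Dict.mk row).getD "date" "") (y :: ys) 0
            = insortPosGo ((PySem.Dict.mk row).getD "date" "") ys 0 + 1 := by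
          simp only [insortPosGo, if_pos h]
          exact insortPosGo_shift _ ys 1
        have hb : decide ((PySem.Dict.mk row).getD "date" "" < (PySem.Dict.mk y).getD "date" "")
            = false := decide_eq_false (not_lt.mpr h)
        show PySem.List.insert (y :: ys)
            ((insortPosGo ((PySem.Dict.mk row).getD "date" "") (y :: ys) 0 : Nat) : Int) row = _
        rw [hpos, PySem.List.insert_natCast (y :: ys) _ row (by simp; omega)]
        simp only [PySem.List.insertBy, hb, Bool.false_eq_true, if_false]
        rw [← ih]
        show _ = y :: PySem.List.insert ys
            ((insortPosGo ((PySem.Dict.mk row).getD "date" "") ys 0 : Nat) : Int) row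
        rw [PySem.List.insert_natCast ys _ row hp]
        simp
      · have hlt : (PySem.Dict.mk row).getD "date" "" < (PySem.Dict.mk y).getD "date" "" :=
          lt_of_not_ge h
        have hpos : insortPosGo ((PySem.Dict.mk row).getD "date" "") (y :: ys) 0 = 0 := by
          simp only [insortPosGo, if_neg h]
        show PySem.List.insert (y :: ys)
            ((insortPosGo ((PySem.Dict.mk row).getD "date" "") (y :: ys) 0 : Nat) : Int) row = _
        rw [hpos]
        simp [PySem.List.insertBy, hlt, PySem.List.insert_zero]

-- `modify` on a dict whose values were transformed by g commutes with `modify` on the original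
theorem dict_map_modify {ν ν' : Type} (g : ν → ν') (d : PySem.Dict String ν) (k : String)
    (dflt : ν) (f : ν → ν) (f' : ν' → ν') (hg : ∀ v, g (f v) = f' (g v)) :
    (PySem.Dict.mk (d.items.map (fun p => (p.1, g p.2)))).modify k (g dflt) f' =
      PySem.Dict.mk (((d.modify k dflt f).items).map (fun p => (p.1, g p.2))) := by
  rcases d with ⟨items⟩
  apply PySem.Dict.ext
  have hcont : (List.map (fun p : String × ν => (p.1, g p.2)) items).any (fun p => p.1 == k)
      = items.any (fun p => p.1 == k) := by
    simp [List.any_map, Function.comp_def]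
  have hfind : List.find? (fun p : String × ν' => p.1 == k)
        (List.map (fun p : String × ν => (p.1, g p.2)) items)
      = Option.map (fun p : String × ν => (p.1, g p.2))
          (List.find? (fun p : String × ν => p.1 == k) items) := by
    rw [List.find?_map]; rfl
  simp only [PySem.Dict.modify, PySem.Dict.insert, PySem.Dict.getD, PySem.Dict.get?,
    PySem.Dict.contains, hcont, hfind]
  by_cases hc : items.any (fun p => p.1 == k) = true
  · simp only [hc, if_true]
    rcases hfd : List.find? (fun p : String × ν => p.1 == k) items with _ | p
    · exfalso
      obtain ⟨x, hx, hxk⟩ := List.any_eq_true.mp hc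
      exact (List.find?_eq_none.mp hfd x hx) hxk
    · simp only [Option.map_some, Option.getD_some]
      rw [List.map_map, List.map_map]
      apply List.map_congr_left
      intro a _
      by_cases ha : a.1 = k
      · simp [ha, hg]
      · simp [ha]
  · have hnone : List.find? (fun p : String × ν => p.1 == k) items = none := by
      rw [List.find?_eq_none]
      intro p hp hpk
      exact hc (List.any_eq_true.mpr ⟨p, hp, hpk⟩)
    simp [hc, hnone, List.map_append, ← hg]

-- B's grouping pass maintains, entry by entry, the insertBy-fold of A's grouped lists
theorem groups_eq (rows : List (List (String × String))) :
    ∀ d : PySem.Dict String (List (List (String × String))),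
    rows.foldl
        (fun d row =>
          d.modify ((PySem.Dict.mk row).getD "campaign" "unknown") []
            (fun l => insort_by_date l row))
        (PySem.Dict.mk (d.items.map (fun p => (p.1, pvSortFold p.2))))
      = PySem.Dict.mk
          ((rows.foldl
              (fun d row =>
                d.modify ((PySem.Dict.mk row).getD "campaign" "unknown") []
                  (fun l => l ++ [row]))
              d).items.map (fun p => (p.1, pvSortFold p.2))) := by
  induction rows with
  | nil => intro d; rfl
  | cons row rest ih =>
      intro d
      simp only [List.foldl_cons]
      have hg : ∀ v, pvSortFold (v ++ [row]) = insort_by_date (pvSortFold v) row := by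
        intro v
        rw [insort_eq_insertBy]
        simp [pvSortFold, List.foldl_append]
      have hstep : (PySem.Dict.mk (d.items.map (fun p => (p.1, pvSortFold p.2)))).modify
            ((PySem.Dict.mk row).getD "campaign" "unknown") [] (fun l => insort_by_date l row)
          = PySem.Dict.mk
              (((d.modify ((PySem.Dict.mk row).getD "campaign" "unknown") []
                  (fun l => l ++ [row])).items).map (fun p => (p.1, pvSortFold p.2))) :=
        dict_map_modify pvSortFold d ((PySem.Dict.mk row).getD "campaign" "unknown")
          [] (fun l => l ++ [row]) (fun l => insort_by_date l row) hg
      rw [hstep]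
      exact ih _

-- ===== VERDICT (by name: the statement is the Claim_ definition above) =====
theorem get_recent_data_py_spec : Claim_equal_get_recent_data_py := by
  intro campaign_data days _
  unfold Spec_get_recent_data_py get_recent_data_py get_recent_data_py_alt
  have h := groups_eq campaign_data (PySem.Dict.mk [])
  simp only [List.map_nil] at h
  rw [h]
  simp only [List.foldl_map]
  rfl
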